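-- pv_equiv track=rewrite | github.com/pypi-data/pypi-mirror-401 | packages/tenets/tenets-0.10.0-py3-none-any.whl/tenets/core/analysis/implementations/java_analyzer.py | _parse_implements_list
-- ===== SOURCE A (Python) =====
-- from typing import Any, Dict, List, Optional, Set
--
-- def _parse_implements_list(implements_str: str) -> List[str]:
--     """Parse the implements clause into a list of interfaces.
--
--     Args:
--         implements_str: String containing comma-separated interfaces
--
--     Returns:
--         List of interface names
--     """
--     if not implements_str:
--         return []
--
--     # Handle generic types
--     interfaces = []
--     current = ""
--     depth = 0
--
--     for char in implements_str:
--         if char == "<":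
--             depth += 1
--         elif char == ">":
--             depth -= 1
--         elif char == "," and depth == 0:
--             if current.strip():
--                 interfaces.append(current.strip())
--             current = ""
--             continue
--         current += char
--
--     if current.strip():
--         interfaces.append(current.strip())
--
--     return interfaces
-- ===== SOURCE B (Python) =====
-- def _split_first(s):
--     """Return (text up to the first top-level comma, remainder after it);
--     remainder is None when there is no top-level comma."""
--     depth = 0
--     for i, ch in enumerate(s):
--         if ch == "<":
--             depth += 1
--         elif ch == ">":
--             depth -= 1
--         elif ch == "," and depth == 0:
--             return s[:i], s[i + 1:]
--     return s, None
--
--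
-- def _parse_implements_list(implements_str):
--     if not implements_str:
--         return []
--     interfaces = []
--     rest = implements_str
--     while rest is not None:
--         seg, rest = _split_first(rest)
--         seg = seg.strip()
--         if seg:
--             interfaces.append(seg)
--     return interfaces
-- ===== Notes on version B (the rewrite author's own statement) =====
-- stated objective: alternative
-- what changed: Replaces A's single-pass char-accumulator fold (building each segment one character at a time with a depth counter) by a recursive decomposition: a helper splits off the text before the first top-level comma and returns the remainder, and a loop repeatedly applies it, stripping and collecting each non-empty segment.
import Mathlib
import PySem

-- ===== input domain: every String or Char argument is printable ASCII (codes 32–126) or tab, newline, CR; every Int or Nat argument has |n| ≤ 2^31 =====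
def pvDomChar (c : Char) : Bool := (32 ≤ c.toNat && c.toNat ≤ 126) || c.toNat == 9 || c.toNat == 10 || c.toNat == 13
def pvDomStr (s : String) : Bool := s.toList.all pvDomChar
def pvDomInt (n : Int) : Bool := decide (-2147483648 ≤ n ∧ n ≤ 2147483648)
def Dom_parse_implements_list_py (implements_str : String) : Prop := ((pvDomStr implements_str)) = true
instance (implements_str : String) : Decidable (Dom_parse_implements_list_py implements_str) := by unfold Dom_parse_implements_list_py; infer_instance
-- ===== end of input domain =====

-- B replaces A's single char-accumulator fold by a recursive "split off the text before the
-- first top-level comma, then recurse on the remainder" decomposition (objective: alternative).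

-- ===== PORT A =====
-- state: (interfaces, current, depth); current kept as List Char ('current += char')
def pvAStep (st : List String × List Char × Int) (c : Char) : List String × List Char × Int :=
  let (interfaces, current, depth) := st
  if c = '<' then (interfaces, current ++ [c], depth + 1)
  else if c = '>' then (interfaces, current ++ [c], depth - 1)
  else if c = ',' ∧ depth = 0 then
    ((if PySem.Chars.strip current ≠ [] then interfaces ++ [String.ofList (PySem.Chars.strip current)] else interfaces), [], depth)
  else (interfaces, current ++ [c], depth)

def parse_implements_list_py (implements_str : String) : List String :=
  if implements_str = "" then []
  else
    let st := implements_str.toList.foldl pvAStep ([], [], 0)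
    if PySem.Chars.strip st.2.1 ≠ [] then st.1 ++ [String.ofList (PySem.Chars.strip st.2.1)] else st.1

-- ===== PORT B =====
-- _split_first: scan tracking depth; at the first depth-0 comma return (prefix, some remainder)
def pvSplitFirst : List Char → Int → List Char × Option (List Char)
  | [], _ => ([], none)
  | c :: rest, depth =>
    if c = '<' then
      let p := pvSplitFirst rest (depth + 1); (c :: p.1, p.2)
    else if c = '>' then
      let p := pvSplitFirst rest (depth - 1); (c :: p.1, p.2)
    else if c = ',' ∧ depth = 0 then ([], some rest)
    else
      let p := pvSplitFirst rest depth; (c :: p.1, p.2)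

theorem pvSplitFirst_rest_lt : ∀ (s : List Char) (d : Int) (r : List Char),
    (pvSplitFirst s d).2 = some r → r.length < s.length := by
  intro s
  induction s with
  | nil => intro d r h; simp [pvSplitFirst] at h
  | cons c rest ih =>
    intro d r h
    simp only [pvSplitFirst] at h
    split_ifs at h with h1 h2 h3
    · exact Nat.lt_succ_of_lt (ih _ _ h)
    · exact Nat.lt_succ_of_lt (ih _ _ h)
    · simp at h; subst h; exact Nat.lt_succ_self _
    · exact Nat.lt_succ_of_lt (ih _ _ h)

-- the while loop of B: flush the stripped segment, recurse on the remainder (if any)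
def pvAltLoop (s : List Char) : List String :=
  let p := pvSplitFirst s 0
  (if PySem.Chars.strip p.1 ≠ [] then [String.ofList (PySem.Chars.strip p.1)] else []) ++
  (match h : p.2 with
   | none => []
   | some r => pvAltLoop r)
termination_by s.length
decreasing_by exact pvSplitFirst_rest_lt s 0 r h

def parse_implements_list_py_alt (implements_str : String) : List String :=
  if implements_str = "" then [] else pvAltLoop implements_str.toList

-- ===== PRECONDITION & SPEC =====
def Spec_parse_implements_list_py (implements_str : String) (out : List String) : Prop := out = parse_implements_list_py_alt implements_str
instance (implements_str : String) (out : List String) : Decidable (Spec_parse_implements_list_py implements_str out) := by unfold Spec_parse_implements_list_py; infer_instance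

-- ===== CLAIM (what is proved, stated in full; the proofs are below) =====
def Claim_equal_parse_implements_list_py : Prop := ∀ (implements_str : String), Dom_parse_implements_list_py implements_str → Spec_parse_implements_list_py implements_str (parse_implements_list_py implements_str)

-- ===== LEMMAS AND PROOFS =====
def pvFlush (l : List Char) : List String :=
  if PySem.Chars.strip l ≠ [] then [String.ofList (PySem.Chars.strip l)] else []

-- what the rest of A's fold contributes, phrased through pvSplitFirst
def pvBfrom (cur : List Char) (d : Int) (s : List Char) : List String :=
  match pvSplitFirst s d with
  | (a, none) => pvFlush (cur ++ a)
  | (a, some r) => pvFlush (cur ++ a) ++ pvAltLoop r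

theorem pvAltLoop_eq_Bfrom (s : List Char) : pvAltLoop s = pvBfrom [] 0 s := by
  rw [pvAltLoop, pvBfrom]
  rcases hp : pvSplitFirst s 0 with ⟨a, b⟩
  cases b <;> simp [hp, pvFlush]

theorem pvFold_eq (s : List Char) : ∀ (cur : List Char) (d : Int) (I : List String),
    (let st := s.foldl pvAStep (I, cur, d)
     if PySem.Chars.strip st.2.1 ≠ [] then st.1 ++ [String.ofList (PySem.Chars.strip st.2.1)] else st.1)
      = I ++ pvBfrom cur d s := by
  induction s with
  | nil =>
    intro cur d I
    simp only [List.foldl_nil, pvBfrom, pvSplitFirst, pvFlush, List.append_nil]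
    split_ifs <;> simp
  | cons c rest ih =>
    intro cur d I
    simp only [List.foldl_cons]
    by_cases h1 : c = '<'
    · rw [show pvAStep (I, cur, d) c = (I, cur ++ [c], d + 1) by simp [pvAStep, h1]]
      rw [ih (cur ++ [c]) (d + 1) I]
      rcases hp : pvSplitFirst rest (d + 1) with ⟨a, b⟩
      cases b <;> simp [pvBfrom, pvSplitFirst, h1, hp]
    · by_cases h2 : c = '>'
      · rw [show pvAStep (I, cur, d) c = (I, cur ++ [c], d - 1) by simp [pvAStep, h1, h2]]
        rw [ih (cur ++ [c]) (d - 1) I]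
        rcases hp : pvSplitFirst rest (d - 1) with ⟨a, b⟩
        cases b <;> simp [pvBfrom, pvSplitFirst, h1, h2, hp]
      · by_cases h3 : c = ',' ∧ d = 0
        · rw [show pvAStep (I, cur, d) c = (I ++ pvFlush cur, [], d) by
            simp [pvAStep, h1, h2, h3, pvFlush]; split_ifs <;> simp]
          rw [ih [] d (I ++ pvFlush cur)]
          rw [show pvBfrom cur d (c :: rest) = pvFlush cur ++ pvAltLoop rest by
            simp [pvBfrom, pvSplitFirst, h1, h2, h3]]
          rw [h3.2, ← pvAltLoop_eq_Bfrom, List.append_assoc]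
        · rw [show pvAStep (I, cur, d) c = (I, cur ++ [c], d) by simp [pvAStep, h1, h2, h3]]
          rw [ih (cur ++ [c]) d I]
          rcases hp : pvSplitFirst rest d with ⟨a, b⟩
          cases b <;> simp [pvBfrom, pvSplitFirst, h1, h2, h3, hp]

-- ===== VERDICT (by name: the statement is the Claim_ definition above) =====
theorem parse_implements_list_py_spec : Claim_equal_parse_implements_list_py := by
  intro s _
  unfold Spec_parse_implements_list_py parse_implements_list_py parse_implements_list_py_alt
  by_cases hs : s = ""
  · simp [hs]
  · simp only [if_neg hs]
    rw [pvFold_eq s.toList [] 0 [], pvAltLoop_eq_Bfrom]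
    simp
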